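-- pv_equiv track=rewrite | github.com/chicharitozzz/RON_AC | V_AC.py | splitTours
-- ===== SOURCE A (Python) =====
-- def splitTours(bestTour, depots):
--   tour=bestTour[:-1]
--   tmp=0
--   tourslist=[]
--   for i in range(len(tour)):
--     if(tour[i] in depots):
--       if tmp != i:
--         tourslist.append(tour[tmp:i])
--       tmp=i+1
--   if tmp != len(tour):
--     tourslist.append(tour[tmp:])
--   for i in range(len(tourslist)):
--     for j in range(len(tourslist[i])):
--       tourslist[i][j]-=(len(depots)-1)
--   return tourslist
-- ===== SOURCE B (Python) =====
-- def splitTours(bestTour, depots):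
--     dep = set(depots)
--     off = len(depots) - 1
--     res = []
--     cur = []
--     for x in bestTour[:-1]:
--         if x in dep:
--             if cur:
--                 res.append(cur)
--             cur = []
--         else:
--             cur.append(x - off)
--     if cur:
--         res.append(cur)
--     return res
-- ===== Notes on version B (the rewrite author's own statement) =====
-- stated objective: faster
-- what changed: B replaces A's three passes (index loop testing membership in the depots list and collecting slices, then a nested index loop mutating every element) by one structural pass over bestTour[:-1] that accumulates the current segment with the offset already subtracted and flushes it at each depot, using a set for depot membership.
import Mathlib
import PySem

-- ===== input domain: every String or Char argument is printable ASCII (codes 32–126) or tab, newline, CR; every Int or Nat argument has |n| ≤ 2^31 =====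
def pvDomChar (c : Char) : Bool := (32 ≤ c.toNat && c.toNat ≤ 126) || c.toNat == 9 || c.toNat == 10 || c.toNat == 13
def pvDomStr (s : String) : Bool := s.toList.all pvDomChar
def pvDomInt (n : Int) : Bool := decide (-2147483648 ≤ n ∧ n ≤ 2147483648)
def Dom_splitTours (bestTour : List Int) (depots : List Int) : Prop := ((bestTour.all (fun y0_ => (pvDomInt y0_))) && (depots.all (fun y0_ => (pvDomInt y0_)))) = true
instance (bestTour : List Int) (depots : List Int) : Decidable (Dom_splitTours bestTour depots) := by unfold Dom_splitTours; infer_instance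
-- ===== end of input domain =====

-- B fuses A's slicing pass and the separate offset-subtraction pass into one accumulation
-- loop over bestTour[:-1] with a set for depot membership (measured faster: A scans the
-- depots list per element).


-- ===== PORT A =====
-- literal transliteration of A: slice off the last element, index loop collecting
-- slices between depot occurrences, then a nested index loop subtracting the offset
-- (list mutation rendered with pySetD; all range indices are nonnegative and in range).
def splitTours (bestTour : List Int) (depots : List Int) : List (List Int) :=
  let tour := PySem.List.slice bestTour none (some (-1))
  let st := (PySem.List.pyRange 0 (tour.length : Int) 1).foldl
    (fun (st : Int × List (List Int)) i =>
      if PySem.List.pyGetD tour i 0 ∈ depots then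
        (i + 1,
         if st.1 ≠ i then st.2 ++ [PySem.List.slice tour (some st.1) (some i)] else st.2)
      else st) (0, [])
  let ts := if st.1 ≠ (tour.length : Int)
            then st.2 ++ [PySem.List.slice tour (some st.1) none] else st.2
  (PySem.List.pyRange 0 (ts.length : Int) 1).foldl
    (fun ts i =>
      (PySem.List.pyRange 0 ((PySem.List.pyGetD ts i []).length : Int) 1).foldl
        (fun ts j =>
          PySem.List.pySetD ts i
            (PySem.List.pySetD (PySem.List.pyGetD ts i []) j
              (PySem.List.pyGetD (PySem.List.pyGetD ts i []) j 0 - ((depots.length : Int) - 1))))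
        ts) ts

-- ===== PORT B =====
-- literal transliteration of Source B: one structural pass, state (res, cur).
def splitTours_alt (bestTour : List Int) (depots : List Int) : List (List Int) :=
  let dep : PySem.Set Int := PySem.Set.ofList depots
  let off : Int := (depots.length : Int) - 1
  let st := (PySem.List.slice bestTour none (some (-1))).foldl
    (fun (st : List (List Int) × List Int) x =>
      if PySem.Set.contains dep x then
        (if st.2 ≠ [] then st.1 ++ [st.2] else st.1, [])
      else (st.1, st.2 ++ [x - off])) ([], [])
  if st.2 ≠ [] then st.1 ++ [st.2] else st.1

-- ===== PRECONDITION & SPEC =====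
def Spec_splitTours (bestTour : List Int) (depots : List Int) (out : List (List Int)) : Prop := out = splitTours_alt bestTour depots
instance (bestTour : List Int) (depots : List Int) (out : List (List Int)) : Decidable (Spec_splitTours bestTour depots out) := by unfold Spec_splitTours; infer_instance

-- ===== CLAIM (what is proved, stated in full; the proofs are below) =====
def Claim_equal_splitTours : Prop := ∀ (bestTour : List Int) (depots : List Int), Dom_splitTours bestTour depots → Spec_splitTours bestTour depots (splitTours bestTour depots)

-- ===== LEMMAS AND PROOFS =====

-- A's main-loop step and finaliser (the port's lambda / tail, named for the lemmas)
def pvStepA (depots tour : List Int) (st : Int × List (List Int)) (i : Int) : Int × List (List Int) :=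
  if PySem.List.pyGetD tour i 0 ∈ depots then
    (i + 1,
     if st.1 ≠ i then st.2 ++ [PySem.List.slice tour (some st.1) (some i)] else st.2)
  else st

def pvPostA (depots tour : List Int) (st : Int × List (List Int)) : List (List Int) :=
  (if st.1 ≠ (tour.length : Int) then st.2 ++ [PySem.List.slice tour (some st.1) none] else st.2).map
    (List.map (fun x => x - ((depots.length : Int) - 1)))

-- B's step and finaliser
def pvStepB (depots : List Int) (st : List (List Int) × List Int) (x : Int) : List (List Int) × List Int :=
  if PySem.Set.contains (PySem.Set.ofList depots) x then
    (if st.2 ≠ [] then st.1 ++ [st.2] else st.1, [])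
  else (st.1, st.2 ++ [x - ((depots.length : Int) - 1)])

def pvPostB (st : List (List Int) × List Int) : List (List Int) :=
  if st.2 ≠ [] then st.1 ++ [st.2] else st.1

lemma pvGetD_eq {α : Type} (l : List α) (d : α) (j : Nat) (hj : j < l.length) :
    l.getD j d = l[j] := by
  rw [List.getD_eq_getElem?_getD, List.getElem?_eq_getElem hj]; rfl

-- an index loop whose body sets position i to f of the current element maps f over the list
lemma pvSet_loop_map {α : Type} (f : α → α) (step : List α → Int → List α)
    (hstep : ∀ (l : List α) (j : Nat) (h : j < l.length), step l (j : Int) = l.set j (f (l[j]'h))) :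
    ∀ (k j : Nat) (l : List α), l.length = j + k →
    (PySem.List.pyRange (j : Int) ((j + k : Nat) : Int) 1).foldl step l
      = l.take j ++ (l.drop j).map f := by
  intro k
  induction k with
  | zero =>
    intro j l hl
    rw [PySem.List.pyRange_one_eq_nil (by push_cast; omega)]
    rw [List.foldl_nil, List.drop_eq_nil_of_le (by omega), List.take_of_length_le (by omega)]
    simp
  | succ k ih =>
    intro j l hl
    have hj : j < l.length := by omega
    rw [PySem.List.pyRange_one_cons (by push_cast; omega)]
    rw [List.foldl_cons, hstep l j hj]
    have hcast : (j : Int) + 1 = ((j + 1 : Nat) : Int) := by push_cast; ring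
    have hcast2 : ((j + (k+1) : Nat) : Int) = (((j+1) + k : Nat) : Int) := by push_cast; ring
    rw [hcast, hcast2, ih (j+1) _ (by simp; omega)]
    have hset : l.set j (f l[j]) = l.take j ++ f l[j] :: l.drop (j+1) := by
      rw [List.set_eq_take_append_cons_drop, if_pos hj]
    have hlenA : (l.take j).length = j := by simp; omega
    have hone : j + 1 - j = 1 := by omega
    have h1 : (l.take j ++ f l[j] :: l.drop (j+1)).take (j+1) = l.take j ++ [f l[j]] := by
      rw [List.take_append, List.take_of_length_le (by omega), hlenA, hone]
      simp
    have h2 : (l.take j ++ f l[j] :: l.drop (j+1)).drop (j+1) = l.drop (j+1) := by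
      rw [List.drop_append, List.drop_eq_nil_of_le (by omega), hlenA, hone]
      simp
    rw [hset, h1, h2, List.drop_eq_getElem_cons hj]
    simp
    rw [List.drop_eq_getElem_cons (show j < (List.map f l).length from by simpa using hj)]
    simp

-- the same loop run over the whole list, from index 0
lemma pvSet_loop_map_top {α : Type} (f : α → α) (step : List α → Int → List α)
    (hstep : ∀ (l : List α) (j : Nat) (h : j < l.length), step l (j : Int) = l.set j (f (l[j]'h)))
    (l : List α) :
    (PySem.List.pyRange 0 (l.length : Int) 1).foldl step l = l.map f := by
  have := pvSet_loop_map f step hstep l.length 0 l (by omega)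
  simpa using this

-- A's inner mutation loop only touches index i: it sets position i to the rewritten segment
lemma pvInner_localize (off : Int) (i : Nat) :
    ∀ (r : List Int) (ts : List (List Int)), i < ts.length →
    r.foldl (fun ts j =>
      PySem.List.pySetD ts (i : Int)
        (PySem.List.pySetD (PySem.List.pyGetD ts (i : Int) []) j
          (PySem.List.pyGetD (PySem.List.pyGetD ts (i : Int) []) j 0 - off))) ts
      = ts.set i (r.foldl
          (fun l j => PySem.List.pySetD l j (PySem.List.pyGetD l j 0 - off)) (ts.getD i [])) := by
  intro r
  induction r with
  | nil =>
    intro ts hi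
    rw [List.foldl_nil, List.foldl_nil, pvGetD_eq ts [] i hi, List.set_getElem_self]
  | cons j r ih =>
    intro ts hi
    simp only [List.foldl_cons]
    have hstep : PySem.List.pySetD ts (i : Int)
        (PySem.List.pySetD (PySem.List.pyGetD ts (i : Int) []) j
          (PySem.List.pyGetD (PySem.List.pyGetD ts (i : Int) []) j 0 - off))
        = ts.set i (PySem.List.pySetD (ts.getD i [])
            j (PySem.List.pyGetD (ts.getD i []) j 0 - off)) := by
      simp [PySem.List.pySetD_natCast, PySem.List.pyGetD_natCast]
    rw [hstep, ih _ (by simp [hi]), List.set_set,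
        pvGetD_eq _ [] i (by simp [hi]), List.getElem_set_self,
        pvGetD_eq ts [] i hi]

-- one step of A's SEGMENT loop: subtracting inside segment i maps the subtraction over it
lemma pvSubI_set (off : Int) (ts : List (List Int)) (i : Nat) (hi : i < ts.length) :
    (fun (ts : List (List Int)) (i : Int) =>
      (PySem.List.pyRange 0 ((PySem.List.pyGetD ts i []).length : Int) 1).foldl
        (fun ts j =>
          PySem.List.pySetD ts i
            (PySem.List.pySetD (PySem.List.pyGetD ts i []) j
              (PySem.List.pyGetD (PySem.List.pyGetD ts i []) j 0 - off))) ts) ts (i : Int)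
      = ts.set i (ts[i].map (fun x => x - off)) := by
  simp only
  rw [PySem.List.pyGetD_natCast]
  rw [pvInner_localize off i _ ts hi]
  rw [pvSet_loop_map_top (fun x : Int => x - off)
        (fun l j => PySem.List.pySetD l j (PySem.List.pyGetD l j 0 - off))
        (fun l j hj => by
          simp [PySem.List.pySetD_natCast, PySem.List.pyGetD_natCast,
                List.getD_eq_getElem?_getD, List.getElem?_eq_getElem hj])
        (ts.getD i [])]
  rw [pvGetD_eq ts [] i hi]

-- A's whole subtraction double loop is map (map (· - off))
lemma pvDouble_loop (off : Int) (ts : List (List Int)) :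
    (PySem.List.pyRange 0 (ts.length : Int) 1).foldl
      (fun ts i =>
        (PySem.List.pyRange 0 ((PySem.List.pyGetD ts i []).length : Int) 1).foldl
          (fun ts j =>
            PySem.List.pySetD ts i
              (PySem.List.pySetD (PySem.List.pyGetD ts i []) j
                (PySem.List.pyGetD (PySem.List.pyGetD ts i []) j 0 - off))) ts) ts
      = ts.map (List.map (fun x => x - off)) := by
  exact pvSet_loop_map_top (List.map (fun x : Int => x - off)) _
      (fun ts i hi => pvSubI_set off ts i hi) ts

-- the two main loops produce the same final value
lemma pvMain (depots tour : List Int) : ∀ (k j tmp : Nat) (ts : List (List Int)),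
    tour.length = j + k → tmp ≤ j →
    pvPostA depots tour
      ((PySem.List.pyRange (j : Int) ((j + k : Nat) : Int) 1).foldl (pvStepA depots tour) ((tmp : Int), ts))
      = pvPostB ((tour.drop j).foldl (pvStepB depots)
          (ts.map (List.map (fun x => x - ((depots.length : Int) - 1))),
           ((tour.drop tmp).take (j - tmp)).map (fun x => x - ((depots.length : Int) - 1)))) := by
  intro k
  induction k with
  | zero =>
    intro j tmp ts hl htmp
    rw [PySem.List.pyRange_one_eq_nil (by push_cast; omega)]
    rw [List.drop_eq_nil_of_le (by omega : tour.length ≤ j)]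
    simp only [List.foldl_nil, pvPostA, pvPostB]
    rw [List.take_of_length_le (by simp; omega)]
    by_cases h : tmp = j
    · subst h
      have hdrop : tour.drop tmp = [] := List.drop_eq_nil_of_le (by omega)
      simp [hdrop, show ¬ ((tmp : Int) ≠ (tour.length : Int)) from by omega]
    · have hne : ((tmp : Int)) ≠ ((tour.length : Int)) := by omega
      have hdrop : tour.drop tmp ≠ [] := by
        intro hc
        have := congrArg List.length hc
        simp at this; omega
      rw [if_pos hne, PySem.List.slice_from tour (by positivity)]
      simp only [Int.toNat_natCast]
      simp
      omega
  | succ k ih =>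
    intro j tmp ts hl htmp
    have hj : j < tour.length := by omega
    rw [PySem.List.pyRange_one_cons (by push_cast; omega)]
    rw [List.foldl_cons, List.drop_eq_getElem_cons hj, List.foldl_cons]
    have hcast : (j : Int) + 1 = ((j + 1 : Nat) : Int) := by push_cast; ring
    have hcast2 : ((j + (k+1) : Nat) : Int) = (((j+1) + k : Nat) : Int) := by push_cast; ring
    have hget : PySem.List.pyGetD tour ((j : Nat) : Int) 0 = tour[j] := by
      rw [PySem.List.pyGetD_natCast, pvGetD_eq tour 0 j hj]
    by_cases hdep : tour[j] ∈ depots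
    · -- depot at position j: A flushes a slice iff tmp ≠ j, B flushes cur iff cur ≠ []
      have hA : pvStepA depots tour ((tmp : Int), ts) (j : Int)
          = (((j + 1 : Nat) : Int),
             if tmp ≠ j then ts ++ [PySem.List.slice tour (some (tmp : Int)) (some (j : Int))] else ts) := by
        simp only [pvStepA, hget, if_pos hdep, hcast]
        congr 1
        by_cases h : tmp = j
        · simp [h]
        · rw [if_pos (by omega : ((tmp : Int)) ≠ ((j : Int))), if_pos h]
      have hB : pvStepB depots
          (ts.map (List.map (fun x => x - ((depots.length : Int) - 1))),
           ((tour.drop tmp).take (j - tmp)).map (fun x => x - ((depots.length : Int) - 1))) tour[j]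
          = ((if tmp ≠ j
              then ts ++ [PySem.List.slice tour (some (tmp : Int)) (some (j : Int))]
              else ts).map (List.map (fun x => x - ((depots.length : Int) - 1))), []) := by
        simp only [pvStepB]
        rw [if_pos (by simp [PySem.Set.mem_ofList, hdep])]
        congr 1
        by_cases h : tmp = j
        · subst h
          simp
        · have hnil : ((tour.drop tmp).take (j - tmp)).map
              (fun x => x - ((depots.length : Int) - 1)) ≠ [] := by
            intro hc
            have := congrArg List.length hc
            simp at this; omega
          rw [if_pos hnil, if_pos h]
          rw [PySem.List.slice_toNat tour (by positivity) (by positivity)]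
          simp
      rw [hA, hcast, hcast2, ih (j+1) (j+1) _ (by omega) (by omega), hB]
      simp
    · -- not a depot: A's state is unchanged, B appends the shifted element to cur
      have hA : pvStepA depots tour ((tmp : Int), ts) (j : Int) = ((tmp : Int), ts) := by
        simp [pvStepA, hget, hdep]
      have hB : pvStepB depots
          (ts.map (List.map (fun x => x - ((depots.length : Int) - 1))),
           ((tour.drop tmp).take (j - tmp)).map (fun x => x - ((depots.length : Int) - 1))) tour[j]
          = (ts.map (List.map (fun x => x - ((depots.length : Int) - 1))),
             ((tour.drop tmp).take ((j + 1) - tmp)).map (fun x => x - ((depots.length : Int) - 1))) := by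
        simp only [pvStepB]
        rw [if_neg (by simp [PySem.Set.mem_ofList, hdep])]
        congr 1
        have hstep : (tour.drop tmp).take ((j + 1) - tmp)
            = (tour.drop tmp).take (j - tmp) ++ [tour[j]] := by
          have h1 : (j + 1) - tmp = (j - tmp) + 1 := by omega
          rw [h1, List.take_add_one, List.getElem?_drop,
              show tmp + (j - tmp) = j from by omega, List.getElem?_eq_getElem hj]
          simp
        rw [hstep]
        simp
      rw [hA, hcast, hcast2, ih (j+1) tmp _ (by omega) (by omega), hB]

-- the port of A, rewritten through the named step/finaliser helpers
lemma pvA_eq (bt dp : List Int) :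
    splitTours bt dp = pvPostA dp (PySem.List.slice bt none (some (-1)))
      ((PySem.List.pyRange 0 ((PySem.List.slice bt none (some (-1))).length : Int) 1).foldl
        (pvStepA dp (PySem.List.slice bt none (some (-1)))) (0, [])) := by
  simp only [splitTours]
  rw [pvDouble_loop]
  rfl

lemma pvB_eq (bt dp : List Int) :
    splitTours_alt bt dp
      = pvPostB ((PySem.List.slice bt none (some (-1))).foldl (pvStepB dp) ([], [])) := rfl

-- ===== VERDICT (by name: the statement is the Claim_ definition above) =====
theorem splitTours_spec : Claim_equal_splitTours := by
  intro bestTour depots _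
  unfold Spec_splitTours
  rw [pvA_eq, pvB_eq]
  have := pvMain depots (PySem.List.slice bestTour none (some (-1)))
      (PySem.List.slice bestTour none (some (-1))).length 0 0 [] (by omega) (le_refl 0)
  simpa using this
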